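-- pv_equiv track=rewrite | github.com/jl-grey-man/aiscanner | backend/api/scrapers/robots.py | _is_blocked
-- ===== SOURCE A (Python) =====
-- def _is_blocked(robots_txt: str, bot: str) -> bool:
--     lines = robots_txt.lower().splitlines()
--     in_block = False
--     for line in lines:
--         line = line.strip()
--         if line.startswith("user-agent:"):
--             agent = line.split(":", 1)[1].strip()
--             in_block = agent == bot.lower() or agent == "*"
--         elif line.startswith("disallow:") and in_block:
--             path = line.split(":", 1)[1].strip()
--             if path == "/":
--                 return True
--     return False
-- ===== SOURCE B (Python) =====
-- def _is_blocked(robots_txt: str, bot: str) -> bool: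
--     # Parse robots.txt into one record per user-agent line (agent, has "disallow: /"),
--     # then query the records; lines before the first user-agent line are dropped.
--     target = bot.lower()
--     records = []  # (agent, has_root_disallow) for each user-agent line, in order
--     for raw in robots_txt.lower().splitlines():
--         line = raw.strip()
--         if line.startswith("user-agent:"):
--             records.append((line.split(":", 1)[1].strip(), False))
--         elif line.startswith("disallow:") and records:
--             if line.split(":", 1)[1].strip() == "/":
--                 records[-1] = (records[-1][0], True)
--     return any((agent == target or agent == "*") and hit for agent, hit in records)
-- ===== Notes on version B (the rewrite author's own statement) =====
-- stated objective: alternative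
-- what changed: Replaces the interleaved in_block state machine with early return by a parse-then-query structure: first build a list of (agent, has-root-disallow) records, one per user-agent line, then answer with a single any() over the records.
import Mathlib
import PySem

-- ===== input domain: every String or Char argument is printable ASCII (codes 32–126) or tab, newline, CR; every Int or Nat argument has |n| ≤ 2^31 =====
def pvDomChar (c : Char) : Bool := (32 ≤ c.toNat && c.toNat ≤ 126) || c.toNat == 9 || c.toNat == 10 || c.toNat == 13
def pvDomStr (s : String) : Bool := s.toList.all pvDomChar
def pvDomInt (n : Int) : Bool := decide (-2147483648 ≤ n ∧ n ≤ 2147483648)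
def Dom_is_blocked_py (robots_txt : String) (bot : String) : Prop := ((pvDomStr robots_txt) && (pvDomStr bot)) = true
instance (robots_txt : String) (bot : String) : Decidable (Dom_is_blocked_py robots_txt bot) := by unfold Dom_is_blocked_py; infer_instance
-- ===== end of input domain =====

-- B parses robots.txt into one (agent, has-root-disallow) record per user-agent line and
-- answers with a single any() over the records, instead of A's in_block state machine with
-- early return (objective: alternative decomposition).


-- ===== PORT A =====
-- the string literals of both Pythons, as named constants
def pvUA : List Char := "user-agent:".toList
def pvDIS : List Char := "disallow:".toList
def pvSTAR : List Char := "*".toList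
def pvSLASH : List Char := "/".toList

-- line.split(":", 1)[1].strip(); the [1] cannot raise at its call sites (the stripped line
-- starts with "user-agent:" / "disallow:", so it contains a colon), ported as .getD [].
def pvAfterColon (line : List Char) : List Char :=
  PySem.Chars.strip ((PySem.List.pyGet? ((PySem.Chars.splitMax? line [':'] 1).getD []) 1).getD [])

-- the for-loop of A, with the early `return True` as a `true` leaf
def pvALoop (target : List Char) : List (List Char) → Bool → Bool
  | [], _ => false
  | raw :: rest, inb =>
    let line := PySem.Chars.strip raw
    if PySem.Chars.startswith line pvUA then
      pvALoop target rest (pvAfterColon line == target || pvAfterColon line == pvSTAR)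
    else if PySem.Chars.startswith line pvDIS && inb then
      if pvAfterColon line == pvSLASH then true else pvALoop target rest inb
    else pvALoop target rest inb

def is_blocked_py (robots_txt : String) (bot : String) : Bool :=
  pvALoop (PySem.Chars.lower bot.toList)
    (PySem.Chars.splitlines (PySem.Chars.lower robots_txt.toList)) false

-- ===== PORT B =====
-- records[-1] = (records[-1][0], True)
def pvSetLastTrue : List (List Char × Bool) → List (List Char × Bool)
  | [] => []
  | [(a, _)] => [(a, true)]
  | p :: q :: rest => p :: pvSetLastTrue (q :: rest)

-- B's parsing loop: builds the record list, one record per user-agent line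
def pvBLoop : List (List Char) → List (List Char × Bool) → List (List Char × Bool)
  | [], recs => recs
  | raw :: rest, recs =>
    let line := PySem.Chars.strip raw
    if PySem.Chars.startswith line pvUA then
      pvBLoop rest (recs ++ [(pvAfterColon line, false)])
    else if PySem.Chars.startswith line pvDIS && !recs.isEmpty then
      if pvAfterColon line == pvSLASH then pvBLoop rest (pvSetLastTrue recs)
      else pvBLoop rest recs
    else pvBLoop rest recs

def is_blocked_py_alt (robots_txt : String) (bot : String) : Bool :=
  let target := PySem.Chars.lower bot.toList
  (pvBLoop (PySem.Chars.splitlines (PySem.Chars.lower robots_txt.toList)) []).any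
    (fun r => (r.1 == target || r.1 == pvSTAR) && r.2)

-- ===== PRECONDITION & SPEC =====
def Spec_is_blocked_py (robots_txt : String) (bot : String) (out : Bool) : Prop := out = is_blocked_py_alt robots_txt bot
instance (robots_txt : String) (bot : String) (out : Bool) : Decidable (Spec_is_blocked_py robots_txt bot out) := by unfold Spec_is_blocked_py; infer_instance

-- ===== CLAIM (what is proved, stated in full; the proofs are below) =====
def Claim_equal_is_blocked_py : Prop := ∀ (robots_txt : String) (bot : String), Dom_is_blocked_py robots_txt bot → Spec_is_blocked_py robots_txt bot (is_blocked_py robots_txt bot)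

-- ===== LEMMAS AND PROOFS =====
lemma pvSetLastTrue_concat (init : List (List Char × Bool)) (a : List Char) (b : Bool) :
    pvSetLastTrue (init ++ [(a, b)]) = init ++ [(a, true)] := by
  induction init with
  | nil => rfl
  | cons p init' ih =>
    cases h : init' ++ [(a, b)] with
    | nil => simp at h
    | cons q rest =>
      rw [List.cons_append, h,
        show pvSetLastTrue (p :: q :: rest) = p :: pvSetLastTrue (q :: rest) from rfl,
        ← h, ih, List.cons_append]

-- the key invariant: running B's parser from any record list whose last record's
-- match status equals A's in_block gives the same final answer
lemma pv_key (target : List Char) (lines : List (List Char)) :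
    ∀ (recs : List (List Char × Bool)) (inb : Bool),
      (recs = [] → inb = false) →
      (∀ init a b, recs = init ++ [(a, b)] → inb = (a == target || a == pvSTAR)) →
      (pvBLoop lines recs).any (fun r => (r.1 == target || r.1 == pvSTAR) && r.2)
        = (recs.any (fun r => (r.1 == target || r.1 == pvSTAR) && r.2)
            || pvALoop target lines inb) := by
  induction lines with
  | nil => intro recs inb _ _; simp [pvBLoop, pvALoop]
  | cons raw rest ih =>
    intro recs inb hnil hlast
    simp only [pvBLoop, pvALoop]
    set line := PySem.Chars.strip raw with hline
    by_cases hua : PySem.Chars.startswith line pvUA = true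
    · rw [if_pos hua, if_pos hua]
      rw [ih (recs ++ [(pvAfterColon line, false)])
            (pvAfterColon line == target || pvAfterColon line == pvSTAR)
            (by simp)
            (by intro init a b h
                have := congrArg List.getLast? h
                simp only [List.getLast?_concat, Option.some.injEq, Prod.mk.injEq] at this
                rw [this.1])]
      simp
    · rw [if_neg hua, if_neg hua]
      by_cases hdis : PySem.Chars.startswith line pvDIS = true
      · rcases List.eq_nil_or_concat recs with rfl | ⟨init, ⟨a, b⟩, hr⟩
        · -- no records yet: B skips the branch; inb = false, so A skips it too
          have hi : inb = false := hnil rfl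
          subst hi
          rw [if_neg (by simp), if_neg (by simp)]
          exact ih [] false (fun _ => rfl) (by intro init a b h; simp at h)
        · rw [List.concat_eq_append] at hr
          subst hr
          have hib : inb = (a == target || a == pvSTAR) := hlast init a b rfl
          rw [if_pos (by simp [hdis])]
          by_cases hpath : pvAfterColon line == pvSLASH
          · rw [if_pos hpath, pvSetLastTrue_concat]
            rw [ih (init ++ [(a, true)]) inb (by simp)
                  (by intro init' a' b' h
                      have := congrArg List.getLast? h
                      simp only [List.getLast?_concat, Option.some.injEq, Prod.mk.injEq] at this
                      rw [← this.1]; exact hib)]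
            cases hi : inb with
            | true =>
              rw [if_pos (by simp [hdis]), if_pos hpath]
              rw [hi] at hib
              simp [← hib]
            | false =>
              rw [if_neg (by simp)]
              rw [hi] at hib
              simp [← hib]
          · rw [if_neg hpath]
            cases hi : inb with
            | true =>
              rw [if_pos (by simp [hdis]), if_neg hpath, ← hi]
              exact ih _ inb (by simp) hlast
            | false =>
              rw [if_neg (by simp), ← hi]
              exact ih _ inb (by simp) hlast
      · rw [if_neg (by simp [hdis]), if_neg (by simp [hdis])]
        exact ih recs inb hnil hlast

-- ===== VERDICT (by name: the statement is the Claim_ definition above) =====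
theorem is_blocked_py_spec : Claim_equal_is_blocked_py := by
  intro robots_txt bot _
  unfold Spec_is_blocked_py is_blocked_py is_blocked_py_alt
  rw [pv_key _ _ [] false (fun _ => rfl) (by intro init a b h; simp at h)]
  simp
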